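-- pv_equiv track=rewrite | github.com/jonathangu/openclawbrain | benchmarks/gold_standard_eval/run_api_bank.py | _extract_bracketed
-- ===== SOURCE A (Python) =====
-- def _extract_bracketed(text: str, start: int) -> tuple[str | None, int | None]:
--     depth = 0
--     in_quote: str | None = None
--     escape = False
--     for idx in range(start, len(text)):
--         ch = text[idx]
--         if escape:
--             escape = False
--             continue
--         if ch == "\\":
--             escape = True
--             continue
--         if in_quote:
--             if ch == in_quote:
--                 in_quote = None
--             continue
--         if ch in ("'", '"'):
--             in_quote = ch
--             continue
--         if ch == "[":
--             depth += 1
--         elif ch == "]":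
--             depth -= 1
--             if depth == 0:
--                 return text[start + 1 : idx], idx
--     return None, None
-- ===== SOURCE B (Python) =====
-- def _extract_bracketed(text: str, start: int) -> tuple[str | None, int | None]:
--     n = len(text)
--     depth = 0
--     idx = start
--     while idx < n:
--         ch = text[idx]
--         if ch == "\\":
--             idx += 2
--             continue
--         if ch in ("'", '"'):
--             idx += 1
--             while idx < n:
--                 c = text[idx]
--                 if c == "\\":
--                     idx += 2
--                 elif c == ch:
--                     idx += 1
--                     break
--                 else:
--                     idx += 1
--             continue
--         if ch == "[":
--             depth += 1
--         elif ch == "]":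
--             depth -= 1
--             if depth == 0:
--                 return text[start + 1 : idx], idx
--         idx += 1
--     return None, None
-- ===== Notes on version B (the rewrite author's own statement) =====
-- stated objective: alternative
-- what changed: Replaces A's flat for-loop with escape/in_quote boolean state flags by a while loop over an explicit index that jumps idx+=2 over escapes and consumes quoted runs in a nested inner scan loop, keeping only the depth counter.
import Mathlib
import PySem

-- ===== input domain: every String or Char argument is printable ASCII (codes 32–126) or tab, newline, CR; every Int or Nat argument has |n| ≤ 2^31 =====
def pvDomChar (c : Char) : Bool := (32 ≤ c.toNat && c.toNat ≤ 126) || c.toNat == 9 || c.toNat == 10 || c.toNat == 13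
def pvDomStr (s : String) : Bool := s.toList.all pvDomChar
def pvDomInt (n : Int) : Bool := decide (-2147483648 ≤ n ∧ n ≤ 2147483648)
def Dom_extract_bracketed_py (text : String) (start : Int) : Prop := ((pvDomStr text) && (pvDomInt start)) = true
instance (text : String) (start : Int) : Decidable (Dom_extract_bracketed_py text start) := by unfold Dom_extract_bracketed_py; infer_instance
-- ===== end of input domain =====

-- B replaces A's flat for-loop with escape/in_quote boolean state flags by a while loop over an
-- explicit index that jumps idx+=2 over escapes and consumes quoted runs in a nested inner loop
-- (objective: alternative decomposition, same cost).

-- ===== PORT A =====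
-- 'for idx in range(start, len(text))' over the range list, state (depth, in_quote, escape);
-- pyGetD is exact here: under Pre_ every visited index is in range (start ≥ -n, idx < n).
def extractA_go (cs : List Char) (start : Int) (idxs : List Int) (depth : Int)
    (inq : Option Char) (esc : Bool) : Option String × Option Int :=
  match idxs with
  | [] => (none, none)
  | idx :: rest =>
    let ch := PySem.List.pyGetD cs idx ' '
    if esc then extractA_go cs start rest depth inq false
    else if ch = '\\' then extractA_go cs start rest depth inq true
    else
      match inq with
      | some q =>
          if ch = q then extractA_go cs start rest depth none false
          else extractA_go cs start rest depth (some q) false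
      | none =>
          if ch = '\'' ∨ ch = '"' then extractA_go cs start rest depth (some ch) false
          else if ch = '[' then extractA_go cs start rest (depth + 1) none false
          else if ch = ']' then
            if depth - 1 = 0 then
              (some (String.ofList (PySem.List.slice cs (some (start + 1)) (some idx))), some idx)
            else extractA_go cs start rest (depth - 1) none false
          else extractA_go cs start rest depth none false

def extract_bracketed_py (text : String) (start : Int) : Option String × Option Int :=
  extractA_go text.toList start (PySem.List.pyRange start (text.toList.length : Int) 1) 0 none false

-- ===== PORT B =====
-- inner while loop: consume characters until the matching quote q (escapes jump by 2);
-- fuel is only a structural bound on the remaining iterations ('while idx < n' is the real guard)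
def extractB_skipQ (cs : List Char) (n : Int) (q : Char) : Nat → Int → Int
  | 0, idx => idx
  | fuel + 1, idx =>
    if idx < n then
      let c := PySem.List.pyGetD cs idx ' '
      if c = '\\' then extractB_skipQ cs n q fuel (idx + 2)
      else if c = q then idx + 1
      else extractB_skipQ cs n q fuel (idx + 1)
    else idx

-- outer while loop over the explicit index, keeping only the depth counter
def extractB_go (cs : List Char) (n start : Int) : Nat → Int → Int → Option String × Option Int
  | 0, _, _ => (none, none)
  | fuel + 1, idx, depth =>
    if idx < n then
      let ch := PySem.List.pyGetD cs idx ' '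
      if ch = '\\' then extractB_go cs n start fuel (idx + 2) depth
      else if ch = '\'' ∨ ch = '"' then
        extractB_go cs n start fuel (extractB_skipQ cs n ch fuel (idx + 1)) depth
      else if ch = '[' then extractB_go cs n start fuel (idx + 1) (depth + 1)
      else if ch = ']' then
        if depth - 1 = 0 then
          (some (String.ofList (PySem.List.slice cs (some (start + 1)) (some idx))), some idx)
        else extractB_go cs n start fuel (idx + 1) (depth - 1)
      else extractB_go cs n start fuel (idx + 1) depth
    else (none, none)

def extract_bracketed_py_alt (text : String) (start : Int) : Option String × Option Int :=
  extractB_go text.toList (text.toList.length : Int) start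
    ((text.toList.length : Int) - start).toNat start 0

-- ===== PRECONDITION & SPEC =====
-- Pre_ excludes exactly the inputs where Python A raises IndexError (start < -len(text):
-- the first access text[start] is out of range); Python B raises there as well.
def Pre_extract_bracketed_py (text : String) (start : Int) : Prop :=
  -(text.toList.length : Int) ≤ start
instance (text : String) (start : Int) : Decidable (Pre_extract_bracketed_py text start) := by
  unfold Pre_extract_bracketed_py; infer_instance

def pvWitness_extract_bracketed_py : String × Int := ("[a]", 0)

def Spec_extract_bracketed_py (text : String) (start : Int) (out : Option String × Option Int) : Prop := out = extract_bracketed_py_alt text start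
instance (text : String) (start : Int) (out : Option String × Option Int) : Decidable (Spec_extract_bracketed_py text start out) := by unfold Spec_extract_bracketed_py; infer_instance

-- ===== CLAIM (what is proved, stated in full; the proofs are below) =====
def Claim_equal_extract_bracketed_py : Prop := ∀ (text : String) (start : Int), Dom_extract_bracketed_py text start → Pre_extract_bracketed_py text start → Spec_extract_bracketed_py text start (extract_bracketed_py text start)

-- ===== LEMMAS AND PROOFS =====

theorem pyRange_one_nil (a b : Int) (h : b ≤ a) : PySem.List.pyRange a b 1 = [] := by
  rw [PySem.List.pyRange_one]
  have : (b - a).toNat = 0 := by omega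
  simp [this]

-- the inner quote scan never moves the index backwards
theorem extractB_skipQ_ge (cs : List Char) (n : Int) (q : Char) (fuel : Nat) (idx : Int) :
    idx ≤ extractB_skipQ cs n q fuel idx := by
  induction fuel generalizing idx with
  | zero => simp [extractB_skipQ]
  | succ fuel ih =>
      rw [extractB_skipQ]
      split
      · dsimp only
        split
        · have := ih (idx + 2); omega
        · split
          · omega
          · have := ih (idx + 1); omega
      · omega

-- any fuel ≥ the remaining distance gives the inner scan the same result
theorem extractB_skipQ_fuel (cs : List Char) (n : Int) (q : Char) (f g : Nat) (idx : Int)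
    (hf : (n - idx).toNat ≤ f) (hg : (n - idx).toNat ≤ g) :
    extractB_skipQ cs n q f idx = extractB_skipQ cs n q g idx := by
  induction f generalizing g idx with
  | zero =>
      have hout : ¬ idx < n := by omega
      cases g with
      | zero => rfl
      | succ g => rw [extractB_skipQ, extractB_skipQ]; simp [hout]
  | succ f ih =>
      cases g with
      | zero =>
          have hout : ¬ idx < n := by omega
          rw [extractB_skipQ, extractB_skipQ]; simp [hout]
      | succ g =>
          rw [extractB_skipQ, extractB_skipQ]
          by_cases hin : idx < n
          · simp only [hin, if_true]
            split
            · exact ih g (idx + 2) (by omega) (by omega)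
            · split
              · rfl
              · exact ih g (idx + 1) (by omega) (by omega)
          · simp [hin]

-- any fuel ≥ the remaining distance gives the outer loop the same result
theorem extractB_go_fuel (cs : List Char) (n start : Int) (f g : Nat) (idx depth : Int)
    (hf : (n - idx).toNat ≤ f) (hg : (n - idx).toNat ≤ g) :
    extractB_go cs n start f idx depth = extractB_go cs n start g idx depth := by
  induction f generalizing g idx depth with
  | zero =>
      have hout : ¬ idx < n := by omega
      cases g with
      | zero => rfl
      | succ g => rw [extractB_go, extractB_go]; simp [hout]
  | succ f ih =>
      cases g with
      | zero =>
          have hout : ¬ idx < n := by omega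
          rw [extractB_go, extractB_go]; simp [hout]
      | succ g =>
          rw [extractB_go, extractB_go]
          by_cases hin : idx < n
          · simp only [hin, if_true]
            set ch := PySem.List.pyGetD cs idx ' ' with hch
            split
            · exact ih g (idx + 2) depth (by omega) (by omega)
            · split
              · have hq : extractB_skipQ cs n ch f (idx + 1) = extractB_skipQ cs n ch g (idx + 1) :=
                  extractB_skipQ_fuel cs n ch f g (idx + 1) (by omega) (by omega)
                rw [hq]
                have hge := extractB_skipQ_ge cs n ch g (idx + 1)
                exact ih g _ depth (by omega) (by omega)
              · split
                · exact ih g (idx + 1) (depth + 1) (by omega) (by omega)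
                · split
                  · split
                    · rfl
                    · exact ih g (idx + 1) (depth - 1) (by omega) (by omega)
                  · exact ih g (idx + 1) depth (by omega) (by omega)
          · simp [hin]

-- After setting the escape flag, A unconditionally consumes the next index.
theorem extractA_escape (cs : List Char) (n start j depth : Int) (inq : Option Char) :
    extractA_go cs start (PySem.List.pyRange j n 1) depth inq true
      = extractA_go cs start (PySem.List.pyRange (j + 1) n 1) depth inq false := by
  by_cases h : j < n
  · rw [PySem.List.pyRange_one_cons (by omega)]
    simp [extractA_go]
  · rw [pyRange_one_nil _ _ (by omega), pyRange_one_nil _ _ (by omega)]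
    rfl

-- Main invariant: outside a quote A's machine equals B's outer loop; inside a quote q (escape
-- flag clear) A's machine equals B's outer loop resumed after the inner quote scan.
theorem extract_main (cs : List Char) (n start : Int) (fuel : Nat) :
    ∀ idx : Int, (n - idx).toNat ≤ fuel →
      (∀ depth : Int,
        extractA_go cs start (PySem.List.pyRange idx n 1) depth none false
          = extractB_go cs n start fuel idx depth) ∧
      (∀ (depth : Int) (q : Char),
        extractA_go cs start (PySem.List.pyRange idx n 1) depth (some q) false
          = extractB_go cs n start fuel (extractB_skipQ cs n q fuel idx) depth) := by
  induction fuel with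
  | zero =>
      intro idx hk
      have hout : n ≤ idx := by omega
      rw [pyRange_one_nil _ _ hout]
      constructor
      · intro depth; rw [extractA_go, extractB_go]
      · intro depth q; rw [extractA_go, extractB_skipQ, extractB_go]
  | succ fuel ih =>
      intro idx hk
      by_cases hin : idx < n
      case neg =>
        rw [pyRange_one_nil _ _ (by omega)]
        constructor
        · intro depth
          rw [extractA_go, extractB_go]; simp [hin]
        · intro depth q
          rw [extractA_go, extractB_skipQ, extractB_go]; simp [hin]
      case pos =>
        have h1 : (n - (idx + 1)).toNat ≤ fuel := by omega
        have h2 : (n - (idx + 2)).toNat ≤ fuel := by omega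
        rw [PySem.List.pyRange_one_cons hin]
        constructor
        · intro depth
          rw [extractA_go, extractB_go]
          simp only [hin, if_true]
          set ch := PySem.List.pyGetD cs idx ' ' with hch
          by_cases hbs : ch = '\\'
          · simp only [hbs, if_true, Bool.false_eq_true, if_false]
            rw [extractA_escape]
            rw [show idx + 1 + 1 = idx + 2 from by ring]
            exact (ih (idx + 2) h2).1 depth
          · simp only [hbs, if_false, Bool.false_eq_true]
            by_cases hq : ch = '\'' ∨ ch = '"'
            · simp only [hq, if_true]
              exact (ih (idx + 1) h1).2 depth ch
            · simp only [hq, if_false]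
              by_cases hob : ch = '['
              · simp only [hob, if_true]
                exact (ih (idx + 1) h1).1 (depth + 1)
              · simp only [hob, if_false]
                by_cases hcb : ch = ']'
                · simp only [hcb, if_true]
                  by_cases hd : depth - 1 = 0
                  · simp [hd]
                  · simp only [hd, if_false]
                    exact (ih (idx + 1) h1).1 (depth - 1)
                · simp only [hcb, if_false]
                  exact (ih (idx + 1) h1).1 depth
        · intro depth q
          rw [extractA_go]
          rw [extractB_skipQ]
          simp only [hin, if_true]
          set ch := PySem.List.pyGetD cs idx ' ' with hch
          by_cases hbs : ch = '\\'
          · simp only [hbs, if_true, Bool.false_eq_true, if_false]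
            rw [extractA_escape]
            rw [show idx + 1 + 1 = idx + 2 from by ring]
            have step := (ih (idx + 2) h2).2 depth q
            rw [step]
            have hge := extractB_skipQ_ge cs n q fuel (idx + 2)
            exact extractB_go_fuel cs n start fuel (fuel + 1) _ depth (by omega) (by omega)
          · simp only [hbs, if_false, Bool.false_eq_true]
            by_cases heq : ch = q
            · simp only [heq, if_true]
              have step := (ih (idx + 1) h1).1 depth
              rw [step]
              exact extractB_go_fuel cs n start fuel (fuel + 1) (idx + 1) depth h1 (by omega)
            · simp only [heq, if_false]
              have step := (ih (idx + 1) h1).2 depth q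
              rw [step]
              have hge := extractB_skipQ_ge cs n q fuel (idx + 1)
              exact extractB_go_fuel cs n start fuel (fuel + 1) _ depth (by omega) (by omega)

-- ===== VERDICT (by name: the statement is the Claim_ definition above) =====
theorem extract_bracketed_py_spec : Claim_equal_extract_bracketed_py := by
  intro text start _ _
  unfold Spec_extract_bracketed_py extract_bracketed_py extract_bracketed_py_alt
  exact (extract_main text.toList (text.toList.length : Int) start
    ((text.toList.length : Int) - start).toNat start (le_refl _)).1 0
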